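-- pv_equiv track=rewrite | github.com/sm-le/bioinformatics | coursera/Genomic_Data_Science Specialization/Python_for_GenonicDS/week3_functions.py | dna_has_stop
-- ===== SOURCE A (Python) =====
-- def dna_has_stop(dna,frame=0):
--     "This function checks if given dna sequence has in-frame stop codons"
--     stop_codon_found = False
--     stop_codons = ['tga','taa','tag']
--     dna = dna.lower()
--     for i in range(frame,len(dna),3):
--         codon = dna[i:i+3]
--         if codon in stop_codons:
--             stop_codon_found = True
--             break
--     return stop_codon_found
-- ===== SOURCE B (Python) =====
-- def dna_has_stop(dna, frame=0):
--     "This function checks if given dna sequence has in-frame stop codons"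
--     d = dna.lower()
--     for stop in ('tga', 'taa', 'tag'):
--         p = d.find(stop, frame)
--         while p != -1:
--             if (p - frame) % 3 == 0:
--                 return True
--             p = d.find(stop, p + 1)
--     return False
-- ===== Notes on version B (the rewrite author's own statement) =====
-- stated objective: alternative
-- what changed: Replaces the stride-3 codon-extraction scan (slice each in-frame codon, compare against the stop list) by three substring searches: for each stop codon, str.find locates successive occurrences and the in-frame residue test (p - frame) % 3 == 0 filters them.
-- outside the precondition, e.g. on dna_has_stop('ataga', -4): A returns True, B returns False
import Mathlib
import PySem

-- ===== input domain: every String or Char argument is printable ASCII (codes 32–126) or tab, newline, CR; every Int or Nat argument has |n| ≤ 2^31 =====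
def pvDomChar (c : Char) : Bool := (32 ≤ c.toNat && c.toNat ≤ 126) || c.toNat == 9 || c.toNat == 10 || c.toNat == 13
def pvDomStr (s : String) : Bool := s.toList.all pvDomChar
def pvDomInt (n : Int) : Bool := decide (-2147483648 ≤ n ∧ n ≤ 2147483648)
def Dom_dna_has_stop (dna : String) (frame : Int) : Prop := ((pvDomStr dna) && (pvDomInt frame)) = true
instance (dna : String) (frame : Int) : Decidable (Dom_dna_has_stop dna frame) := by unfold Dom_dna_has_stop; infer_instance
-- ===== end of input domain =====

-- B replaces A's stride-3 codon-extraction loop by three substring searches (str.find per stop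
-- codon) whose hit positions are filtered by the in-frame residue test (objective: alternative).

-- ===== PORT A =====
def pvStopCodons : List (List Char) := [['t','g','a'], ['t','a','a'], ['t','a','g']]

-- the 'for i in range(frame,len(dna),3): … break' loop with the flag: first hit returns True
def pvLoopA (d : List Char) (idxs : List Int) : Bool :=
  match idxs with
  | [] => false
  | i :: rest =>
    let codon := PySem.List.slice d (some i) (some (i + 3))
    if pvStopCodons.contains codon then true
    else pvLoopA d rest

def dna_has_stop (dna : String) (frame : Int) : Bool :=
  let d := PySem.Chars.lower dna.toList
  pvLoopA d (PySem.List.pyRange frame (d.length : Int) 3)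

-- ===== PORT B =====
-- the "p = d.find(stop, start); while p != -1: ..." loop for one stop codon;
-- the fuel argument (d.length + 1 at the top call) only makes the recursion structural:
-- under Pre_ it never runs out, since each find-hit is at a strictly larger index
def pvScanB (d stop : List Char) (frame : Int) (fuel : Nat) (start : Int) : Bool :=
  match fuel with
  | 0 => false
  | Nat.succ fuel =>
    let p := PySem.Chars.findFrom d stop start none
    if p = -1 then false
    else if PySem.Int.mod (p - frame) 3 = 0 then true
    else pvScanB d stop frame fuel (p + 1)

def dna_has_stop_alt (dna : String) (frame : Int) : Bool :=
  let d := PySem.Chars.lower dna.toList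
  [['t','g','a'], ['t','a','a'], ['t','a','g']].any
    (fun stop => pvScanB d stop frame (d.length + 1) frame)

-- ===== PRECONDITION & SPEC =====
-- Pre_ restricts to the task's natural domain 0 ≤ frame (a reading frame is a nonnegative
-- offset); on negative frame A's value depends on Python's negative-slice wraparound picking
-- codons from the string's tail, an unspecified corner B does not mirror.
def Pre_dna_has_stop (dna : String) (frame : Int) : Prop := 0 ≤ frame
instance (dna : String) (frame : Int) : Decidable (Pre_dna_has_stop dna frame) := by
  unfold Pre_dna_has_stop; infer_instance

def pvWitness_dna_has_stop : String × Int := ("atgtaacc", 0)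

def Spec_dna_has_stop (dna : String) (frame : Int) (out : Bool) : Prop := out = dna_has_stop_alt dna frame
instance (dna : String) (frame : Int) (out : Bool) : Decidable (Spec_dna_has_stop dna frame out) := by
  unfold Spec_dna_has_stop; infer_instance

-- ===== CLAIM (what is proved, stated in full; the proofs are below) =====
def Claim_equal_dna_has_stop : Prop := ∀ (dna : String) (frame : Int), Dom_dna_has_stop dna frame → Pre_dna_has_stop dna frame → Spec_dna_has_stop dna frame (dna_has_stop dna frame)

-- ===== LEMMAS AND PROOFS =====

-- the common characterisation both sides are reduced to
def pvHit (d stop : List Char) (frame : Int) (lo : Int) : Prop :=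
  ∃ s : Nat, lo ≤ (s : Int) ∧ (3 : Int) ∣ ((s : Int) - frame) ∧ stop <+: d.drop s

lemma pvLoopA_iff (d : List Char) (idxs : List Int) :
    pvLoopA d idxs = true ↔
      ∃ i ∈ idxs, pvStopCodons.contains (PySem.List.slice d (some i) (some (i + 3))) = true := by
  induction idxs with
  | nil => simp [pvLoopA]
  | cons i rest ih =>
    simp only [pvLoopA]
    split_ifs with h
    · exact iff_of_true rfl ⟨i, List.mem_cons_self, h⟩
    · rw [ih]
      constructor
      · rintro ⟨j, hj, hc⟩; exact ⟨j, List.mem_cons_of_mem _ hj, hc⟩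
      · rintro ⟨j, hj, hc⟩
        rcases List.mem_cons.mp hj with rfl | hj
        · exact absurd hc h
        · exact ⟨j, hj, hc⟩

lemma slice3_eq_iff (d : List Char) (i : Int) (hi : 0 ≤ i) (stop : List Char)
    (hlen : stop.length = 3) :
    PySem.List.slice d (some i) (some (i + 3)) = stop ↔ stop <+: d.drop i.toNat := by
  rw [PySem.List.slice_toNat d hi (by omega)]
  have h3 : (i + 3).toNat - i.toNat = 3 := by omega
  rw [h3]
  constructor
  · intro h
    rw [← h]
    exact List.take_prefix _ _
  · intro h
    have := List.prefix_iff_eq_take.mp h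
    rw [this, hlen]

lemma prefix_lt_length (d stop : List Char) (s : Nat) (hne : stop ≠ [])
    (h : stop <+: d.drop s) : s < d.length := by
  rcases h with ⟨t, ht⟩
  have : (d.drop s).length = stop.length + t.length := by rw [← ht]; simp
  have hs : 0 < stop.length := List.length_pos_iff.mpr hne
  simp [List.length_drop] at this
  omega

-- A's loop, characterised: a stop codon sits at some in-frame nonnegative position
lemma loopA_char (d : List Char) (frame : Int) (hf : 0 ≤ frame) :
    pvLoopA d (PySem.List.pyRange frame (d.length : Int) 3) = true ↔
      ∃ stop ∈ pvStopCodons, pvHit d stop frame frame := by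
  rw [pvLoopA_iff]
  constructor
  · rintro ⟨i, hi, hc⟩
    rw [PySem.List.mem_pyRange_iff_of_pos (by norm_num)] at hi
    obtain ⟨hi1, hi2, hi3⟩ := hi
    rw [List.contains_iff_exists_mem_beq] at hc
    obtain ⟨stop, hstop, hbeq⟩ := hc
    have heq : PySem.List.slice d (some i) (some (i + 3)) = stop := beq_iff_eq.mp hbeq
    have hi0 : 0 ≤ i := le_trans hf hi1
    have hlen : stop.length = 3 := by fin_cases hstop <;> rfl
    rw [slice3_eq_iff d i hi0 stop hlen] at heq
    have hcast : (i.toNat : Int) = i := Int.toNat_of_nonneg hi0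
    exact ⟨stop, hstop, i.toNat, by omega, by rw [hcast]; exact hi3, heq⟩
  · rintro ⟨stop, hstop, s, hs1, hs2, hs3⟩
    refine ⟨(s : Int), ?_, ?_⟩
    · rw [PySem.List.mem_pyRange_iff_of_pos (by norm_num)]
      have hne : stop ≠ [] := by fin_cases hstop <;> simp
      have := prefix_lt_length d stop s hne hs3
      exact ⟨hs1, by exact_mod_cast this, hs2⟩
    · rw [List.contains_iff_exists_mem_beq]
      refine ⟨stop, hstop, beq_iff_eq.mpr ?_⟩
      have hlen : stop.length = 3 := by fin_cases hstop <;> rfl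
      rw [slice3_eq_iff d (s : Int) (by positivity) stop hlen]
      simpa using hs3

-- B's while loop, characterised: sufficient fuel scans every find-hit from k on
lemma scanB_char (d stop : List Char) (hne : stop ≠ []) (frame : Int) :
    ∀ (fuel k : Nat), d.length + 1 - k ≤ fuel →
      (pvScanB d stop frame fuel (k : Int) = true ↔ pvHit d stop frame (k : Int)) := by
  intro fuel
  induction fuel with
  | zero =>
    intro k hfuel
    simp only [pvScanB]
    constructor
    · intro h; exact absurd h (by simp)
    · rintro ⟨s, hs1, _, hs3⟩
      have := prefix_lt_length d stop s hne hs3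
      omega
  | succ fuel ih =>
    intro k hfuel
    simp only [pvScanB]
    by_cases hklen : k ≤ d.length
    · by_cases h1 : PySem.Chars.findFrom d stop (k : Int) none = -1
      · rw [if_pos h1]
        rw [PySem.Chars.findFrom_natCast_eq_neg_one_iff d stop k hklen] at h1
        constructor
        · intro h; exact absurd h (by simp)
        · rintro ⟨s, hs1, hs2, hs3⟩
          exfalso; apply h1
          rcases hs3 with ⟨t, ht⟩
          have hsk : k ≤ s := by omega
          have hdd : List.drop s d = List.drop (s - k) (List.drop k d) := by
            rw [List.drop_drop]; congr 1; omega
          refine ⟨(d.drop k).take (s - k), t, ?_⟩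
          rw [List.append_assoc, ht, hdd, List.take_append_drop]
      · rw [if_neg h1]
        obtain ⟨hge, hpre, hmin⟩ := PySem.Chars.findFrom_natCast_spec d stop k hklen h1
        set p : Int := PySem.Chars.findFrom d stop (k : Int) none with hp
        have hp0 : (0:Int) ≤ p := le_trans (by positivity) hge
        have hplen : p.toNat < d.length := prefix_lt_length d stop p.toNat hne hpre
        by_cases h2 : PySem.Int.mod (p - frame) 3 = 0
        · rw [if_pos h2]
          constructor
          · intro _
            refine ⟨p.toNat, by omega, ?_, hpre⟩
            rw [Int.toNat_of_nonneg hp0]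
            exact (PySem.Int.mod_eq_zero_iff_dvd _ _).mp h2
          · intro _; rfl
        · rw [if_neg h2]
          have hcast : p + 1 = ((p.toNat + 1 : Nat) : Int) := by omega
          rw [hcast]
          rw [ih (p.toNat + 1) (by omega)]
          unfold pvHit
          constructor
          · rintro ⟨s, hs1, hs2, hs3⟩; exact ⟨s, by omega, hs2, hs3⟩
          · rintro ⟨s, hs1, hs2, hs3⟩
            refine ⟨s, ?_, hs2, hs3⟩
            by_contra hlt
            push_neg at hlt
            rcases Nat.lt_or_ge s p.toNat with h | h
            · exact hmin s (by omega) h hs3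
            · have hsp : s = p.toNat := by omega
              subst hsp
              apply h2
              rw [PySem.Int.mod_eq_zero_iff_dvd]
              rwa [Int.toNat_of_nonneg hp0] at hs2
    · -- k past the end: find fails and no position can hold a codon
      have hfail : PySem.Chars.findFrom d stop (k : Int) none = -1 := by
        have hlt : ((d.length : Int)) < (k : Int) := by exact_mod_cast by omega
        simp only [PySem.Chars.findFrom]
        split_ifs <;> first | rfl | omega
      rw [if_pos hfail]
      constructor
      · intro h; exact absurd h (by simp)
      · rintro ⟨s, hs1, _, hs3⟩
        have := prefix_lt_length d stop s hne hs3
        omega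

lemma altB_char (d : List Char) (frame : Int) (hf : 0 ≤ frame) :
    ([['t','g','a'], ['t','a','a'], ['t','a','g']] : List (List Char)).any
        (fun stop => pvScanB d stop frame (d.length + 1) frame) = true ↔
      ∃ stop ∈ ([['t','g','a'], ['t','a','a'], ['t','a','g']] : List (List Char)),
        pvHit d stop frame frame := by
  have hfr : ((frame.toNat : Nat) : Int) = frame := Int.toNat_of_nonneg hf
  rw [List.any_eq_true]
  constructor
  · rintro ⟨stop, hstop, hb⟩
    have hne : stop ≠ [] := by fin_cases hstop <;> simp
    have key := scanB_char d stop hne frame (d.length + 1) frame.toNat (by omega)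
    rw [hfr] at key
    exact ⟨stop, hstop, key.mp hb⟩
  · rintro ⟨stop, hstop, hhit⟩
    have hne : stop ≠ [] := by fin_cases hstop <;> simp
    have key := scanB_char d stop hne frame (d.length + 1) frame.toNat (by omega)
    rw [hfr] at key
    exact ⟨stop, hstop, key.mpr hhit⟩

-- ===== VERDICT (by name: the statement is the Claim_ definition above) =====
theorem dna_has_stop_spec : Claim_equal_dna_has_stop := by
  intro dna frame _ hf
  unfold Spec_dna_has_stop dna_has_stop dna_has_stop_alt
  simp only []
  rw [Bool.eq_iff_iff]
  rw [loopA_char _ _ hf, altB_char _ _ hf]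
  rfl
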